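-- pv_equiv track=rewrite | github.com/nureOleksiiPyvovarov/Preprocessing_IAD | Regression.py | func_a
-- ===== SOURCE A (Python) =====
-- def func_a(a, k):
--     x = [[None for y in range(len(a))] for x in range(len(a))]
--
--     for i in range(len(a)):
--         for j in range(len(a)):
--             x[i][j] = a[i][j]
--
--     del x[k]
--
--     for i in x:
--         del i[0]
--
--     return x
-- ===== SOURCE B (Python) =====
-- def func_a(a, k):
--     n = len(a)
--     # work in column-major space: transpose, delete row k inside each column,
--     # drop the column holding old column 0, transpose back
--     cols = [[a[i][j] for i in range(n)] for j in range(n)]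
--     for c in cols:
--         del c[k]
--     del cols[0]
--     return [[c[r] for c in cols] for r in range(n - 1)]
-- ===== Notes on version B (the rewrite author's own statement) =====
-- stated objective: alternative
-- what changed: B works in column-major space: it transposes the matrix, deletes row k inside every column, drops the first column, and transposes back, instead of A's row-major copy followed by two row/column deletion passes.
import Mathlib
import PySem

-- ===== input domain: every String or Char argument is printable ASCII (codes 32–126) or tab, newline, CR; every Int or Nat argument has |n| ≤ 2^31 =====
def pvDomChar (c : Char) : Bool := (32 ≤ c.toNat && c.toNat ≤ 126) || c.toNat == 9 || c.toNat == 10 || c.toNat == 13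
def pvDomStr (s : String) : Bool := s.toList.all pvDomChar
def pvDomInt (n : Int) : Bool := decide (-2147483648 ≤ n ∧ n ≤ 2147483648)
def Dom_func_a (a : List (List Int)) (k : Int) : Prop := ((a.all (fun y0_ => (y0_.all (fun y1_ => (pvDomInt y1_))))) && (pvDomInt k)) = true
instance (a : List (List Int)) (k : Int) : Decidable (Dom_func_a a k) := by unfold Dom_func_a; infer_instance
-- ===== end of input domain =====

-- B works in column-major space (transpose, delete row k inside each column, drop the first
-- column, transpose back); A copies the matrix row-major and runs two deletion passes.

-- ===== PORT A =====
def func_a (a : List (List Int)) (k : Int) : List (List Int) :=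
  let n : Int := a.length
  -- x = [[None for y in range(len(a))] for x in range(len(a))]
  let x0 : List (List (Option Int)) :=
    (PySem.List.pyRange 0 n 1).map (fun _x => (PySem.List.pyRange 0 n 1).map (fun _y => (none : Option Int)))
  -- for i in range(len(a)): for j in range(len(a)): x[i][j] = a[i][j]
  -- (the indices into x are always in range, so pySetD/pyGetD are exact here;
  --  a[i][j] is pyGet?; a 'none' cell records an IndexError, excluded by Pre_)
  let x1 := (PySem.List.pyRange 0 n 1).foldl (fun x i =>
      PySem.List.pySetD x i
        ((PySem.List.pyRange 0 n 1).foldl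
          (fun row j => PySem.List.pySetD row j ((PySem.List.pyGet? a i).bind (fun r => PySem.List.pyGet? r j)))
          (PySem.List.pyGetD x i []))) x0
  -- del x[k]   (IndexError = none, excluded by Pre_)
  let x2 := match PySem.List.pop? x1 k with
    | some p => p.2
    | none => []
  -- for i in x: del i[0]   (empty rows only occur outside Pre_); rows hold real ints inside Pre_ (getD 0 only reached outside Pre_)
  (x2.map (fun r => List.drop 1 r)).map (fun r => r.map (fun o => o.getD 0))

-- ===== PORT B =====
def func_a_alt (a : List (List Int)) (k : Int) : List (List Int) :=
  let n : Int := a.length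
  -- cols = [[a[i][j] for i in range(n)] for j in range(n)]  (transpose; a 'none' cell records an IndexError, excluded by Pre_)
  let cols0 : List (List (Option Int)) :=
    (PySem.List.pyRange 0 n 1).map (fun j => (PySem.List.pyRange 0 n 1).map (fun i =>
      (PySem.List.pyGet? a i).bind (fun r => PySem.List.pyGet? r j)))
  -- for c in cols: del c[k]   (IndexError = none, excluded by Pre_)
  let cols1 := cols0.map (fun c => match PySem.List.pop? c k with | some p => p.2 | none => [])
  -- del cols[0]   (IndexError = none, only when a = [], excluded by Pre_)
  let cols2 := match PySem.List.pop? cols1 0 with | some p => p.2 | none => []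
  -- return [[c[r] for c in cols] for r in range(n - 1)]   (c[r] in range inside Pre_; the getD defaults are only reached outside Pre_)
  (PySem.List.pyRange 0 (n - 1) 1).map (fun r =>
    cols2.map (fun c => ((PySem.List.pyGet? c r).getD none).getD 0))

-- ===== PRECONDITION & SPEC =====
-- Pre_ = exactly the inputs where Python A returns: every row at least n = len(a) long
-- (the copy loop reads a[i][j] for all j < n) and k a valid index for 'del x[k]'.
def Pre_func_a (a : List (List Int)) (k : Int) : Prop :=
  (∀ r ∈ a, a.length ≤ r.length) ∧ -(a.length : Int) ≤ k ∧ k < a.length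
instance (a : List (List Int)) (k : Int) : Decidable (Pre_func_a a k) := by unfold Pre_func_a; infer_instance

def pvWitness_func_a : List (List Int) × Int := ([[1, 2], [3, 4]], 0)

def Spec_func_a (a : List (List Int)) (k : Int) (out : List (List Int)) : Prop := out = func_a_alt a k
instance (a : List (List Int)) (k : Int) (out : List (List Int)) : Decidable (Spec_func_a a k out) := by unfold Spec_func_a; infer_instance

-- ===== CLAIM (what is proved, stated in full; the proofs are below) =====
def Claim_equal_func_a : Prop := ∀ (a : List (List Int)) (k : Int), Dom_func_a a k → Pre_func_a a k → Spec_func_a a k (func_a a k)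

-- ===== LEMMAS AND PROOFS =====

-- filling a list position-by-position over range m, reading each position before writing it
lemma foldl_set_read {α : Type} (d : α) (w : ℕ → α → α) :
    ∀ (m : ℕ) (init : List α), m ≤ init.length →
    (List.range m).foldl (fun acc i => acc.set i (w i (acc.getD i d))) init
      = (List.range m).map (fun i => w i (init.getD i d)) ++ init.drop m := by
  intro m
  induction m with
  | zero => simp
  | succ m ih =>
    intro init hm
    rw [List.range_succ, List.foldl_append, List.map_append, ih init (by omega)]
    have hlt : m < init.length := by omega
    have hP : ((List.range m).map (fun i => w i (init.getD i d))).length = m := by simp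
    have hdrop : init.drop m = init[m] :: init.drop (m + 1) := by
      rw [List.drop_eq_getElem_cons hlt]
    have hget : (((List.range m).map (fun i => w i (init.getD i d))) ++ init.drop m).getD m d = init[m] := by
      rw [List.getD_eq_getElem?_getD, List.getElem?_append_right (le_of_eq hP), hP, hdrop]
      simp [List.getElem?_eq_getElem hlt]
    rw [List.foldl_cons, List.foldl_nil, hget, hdrop,
      List.set_append_right _ _ (le_of_eq hP), hP]
    simp
    rw [hdrop, List.set_cons_zero]
    simp [List.getElem?_eq_getElem hlt]

-- a valid Python index k for a list of length n normalises to some m < n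
lemma pyIdx_valid (n : ℕ) (k : Int) (h1 : -(n : Int) ≤ k) (h2 : k < n) :
    ∃ m : ℕ, PySem.List.pyIdx? n k = some m ∧ m < n := by
  unfold PySem.List.pyIdx?
  by_cases h0 : 0 ≤ k
  · rw [if_pos h0, if_pos h2]
    exact ⟨k.toNat, rfl, by omega⟩
  · rw [if_neg h0, if_pos h1]
    exact ⟨n - (-k).toNat, rfl, by omega⟩

-- pop? at a normalised index is eraseIdx
lemma pop?_eq_eraseIdx {α : Type} (l : List α) (k : Int) (m : ℕ)
    (h : PySem.List.pyIdx? l.length k = some m) (hm : m < l.length) :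
    ∃ x, PySem.List.pop? l k = some (x, l.eraseIdx m) := by
  refine ⟨l[m], ?_⟩
  unfold PySem.List.pop?
  rw [h]
  simp [List.getElem?_eq_getElem hm]

-- mapping over range l.length picking l[i] is mapping over l
lemma map_range_pick {α β : Type} (l : List α) (f : ℕ → β) (g : α → β)
    (h : ∀ (i : ℕ) (hi : i < l.length), f i = g l[i]) :
    (List.range l.length).map f = l.map g := by
  apply List.ext_getElem (by simp)
  intro i h1 h2
  simp only [List.getElem_map, List.getElem_range]
  exact h i (by simpa using h2)


-- the common normal form both ports reduce to: surviving row indices, columns 1..n-1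
def pvNF (a : List (List Int)) (m : ℕ) : List (List Int) :=
  ((List.range a.length).eraseIdx m).map (fun i : ℕ =>
    (List.range (a.length - 1)).map (fun j : ℕ =>
      (((PySem.List.pyGet? a (i : Int)).bind (fun r => PySem.List.pyGet? r ((j : Int) + 1))).getD 0)))

lemma A_eq (a : List (List Int)) (k : Int) (m : ℕ)
    (hidx : PySem.List.pyIdx? a.length k = some m) (hm : m < a.length) :
    func_a a k = pvNF a m := by
  unfold func_a pvNF
  simp only []
  rw [PySem.List.pyRange_zero_nat a.length]
  set n := a.length with hn
  set L := (List.range n).map (fun k : ℕ => (k : Int)) with hL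
  set vv : Int → Int → Option Int := fun i j => (PySem.List.pyGet? a i).bind (fun r => PySem.List.pyGet? r j) with hvv
  set R0 : List (Option Int) := L.map (fun _y => (none : Option Int)) with hR0
  have hR0len : R0.length = n := by simp [hR0, hL]
  set x0 : List (List (Option Int)) := L.map (fun _x => R0) with hx0
  have hx0len : x0.length = n := by simp [hx0, hL]
  have hx1 :
      L.foldl (fun x i =>
        PySem.List.pySetD x i
          (L.foldl (fun row j => PySem.List.pySetD row j (vv i j)) (PySem.List.pyGetD x i []))) x0
      = (List.range n).map (fun i : ℕ => (List.range n).map (fun j : ℕ => vv i j)) := by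
    rw [hL, List.foldl_map]
    simp only [List.foldl_map, PySem.List.pySetD_natCast, PySem.List.pyGetD_natCast]
    rw [foldl_set_read [] (fun i r => (List.range n).foldl (fun row j => row.set j (vv i j)) r) n x0 (le_of_eq hx0len.symm)]
    rw [List.drop_eq_nil_of_le (le_of_eq hx0len), List.append_nil]
    refine List.map_congr_left (fun i hi => ?_)
    have hilt : i < n := List.mem_range.mp hi
    have hget0 : x0.getD i [] = R0 := by
      rw [hx0, List.getD_eq_getElem _ _ (by simpa [hx0, hL] using hilt)]
      simp [hL]
    rw [hget0,
      foldl_set_read (none : Option Int) (fun j _r => vv i j) n R0 (le_of_eq hR0len.symm),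
      List.drop_eq_nil_of_le (le_of_eq hR0len), List.append_nil]
  rw [hx1]
  set M : List (List (Option Int)) := (List.range n).map (fun i : ℕ => (List.range n).map (fun j : ℕ => vv i j)) with hM
  have hMlen : M.length = n := by simp [hM]
  obtain ⟨xA, hA⟩ := pop?_eq_eraseIdx M k m (by rw [hMlen]; exact hidx) (by omega)
  rw [hA]
  have hMerase : M.eraseIdx m = ((List.range n).eraseIdx m).map (fun i : ℕ => (List.range n).map (fun j : ℕ => vv i j)) := by
    rw [hM, List.eraseIdx_map]
  have hrange : List.range n = 0 :: (List.range (n - 1)).map (fun j => j + 1) := by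
    conv_lhs => rw [show n = (n - 1) + 1 by omega]
    rw [List.range_succ_eq_map]
  rw [hMerase, List.map_map, List.map_map]
  refine List.map_congr_left (fun i _ => ?_)
  simp only [Function.comp]
  rw [hrange]
  simp only [List.map_cons, List.drop_succ_cons, List.drop_zero, List.map_map]
  refine List.map_congr_left (fun j _ => ?_)
  simp only [Function.comp]
  rw [show ((j : Int) + 1) = (((j + 1 : ℕ)) : Int) by push_cast; ring]

lemma B_eq (a : List (List Int)) (k : Int) (m : ℕ)
    (hidx : PySem.List.pyIdx? a.length k = some m) (hm : m < a.length) :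
    func_a_alt a k = pvNF a m := by
  unfold func_a_alt pvNF
  simp only []
  rw [PySem.List.pyRange_zero_nat a.length]
  set n := a.length with hn
  have hn1 : 1 ≤ n := by omega
  set vv : Int → Int → Option Int := fun i j => (PySem.List.pyGet? a i).bind (fun r => PySem.List.pyGet? r j) with hvv
  set E : List ℕ := (List.range n).eraseIdx m with hE
  have hElen : E.length = n - 1 := by simp [hE, List.length_eraseIdx, hm]
  -- the per-column deletions: every column has length n, so del c[k] is eraseIdx m
  have hcols1 :
      (((List.range n).map (fun j : ℕ => (j : Int))).map (fun j =>
          ((List.range n).map (fun i : ℕ => (i : Int))).map (fun i => vv i j))).map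
        (fun c => match PySem.List.pop? c k with | some p => p.2 | none => ([] : List (Option Int)))
      = (List.range n).map (fun j : ℕ => E.map (fun i : ℕ => vv (i : Int) (j : Int))) := by
    rw [List.map_map, List.map_map]
    refine List.map_congr_left (fun j _ => ?_)
    simp only [Function.comp]
    obtain ⟨x, hx⟩ := pop?_eq_eraseIdx (((List.range n).map (fun i : ℕ => (i : Int))).map (fun i => vv i (j : Int))) k m (by simpa using hidx) (by simpa using hm)
    rw [hx, List.eraseIdx_map, List.eraseIdx_map, List.map_map]
    simp [hE, Function.comp]
  rw [hcols1]
  -- del cols[0]: peel off column j = 0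
  have hrange : List.range n = 0 :: (List.range (n - 1)).map (fun j => j + 1) := by
    conv_lhs => rw [show n = (n - 1) + 1 by omega]
    rw [List.range_succ_eq_map]
  rw [hrange, List.map_cons, PySem.List.pop?_zero_cons]
  simp only [List.map_map]
  -- the outer comprehension over range(n-1) indexes rows of E
  have hcast : (n : Int) - 1 = ((n - 1 : ℕ) : Int) := by omega
  rw [hcast, PySem.List.pyRange_zero_nat (n - 1), List.map_map, ← hElen]
  refine map_range_pick E _ _ (fun r hr => ?_)
  simp only [Function.comp]
  refine List.map_congr_left (fun j _ => ?_)
  simp only [Function.comp]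
  have hrE : r < (E.map (fun i : ℕ => vv (i : Int) ((j + 1 : ℕ) : Int))).length := by
    simpa using hr
  rw [PySem.List.pyGet?_natCast, List.getElem?_eq_getElem hrE]
  simp [hvv]

-- ===== VERDICT (by name: the statement is the Claim_ definition above) =====
theorem func_a_spec : Claim_equal_func_a := by
  intro a k _ hpre
  unfold Spec_func_a
  obtain ⟨m, hidx, hm⟩ := pyIdx_valid a.length k hpre.2.1 hpre.2.2
  rw [A_eq a k m hidx hm, B_eq a k m hidx hm]
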